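-- pv_equiv track=rewrite | github.com/hangisu30-arch/autopj | execution_core/feature_rules.py | primary_display_field
-- ===== SOURCE A (Python) =====
-- from typing import Any, Dict, Iterable, List, Sequence, Tuple
--
-- def primary_display_field(fields: Sequence[Tuple[str, str, str]], excluded_props: Sequence[str] = ()) -> Tuple[str, str, str] | None:
--     excluded = {p.lower() for p in excluded_props}
--     for prop, col, jt in fields or []:
--         low = prop.lower()
--         if low in excluded:
--             continue
--         if any(tok in low for tok in ("name", "title", "label", "nm")):
--             return prop, col, jt
--     for prop, col, jt in fields or []:
--         if prop.lower() not in excluded: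
--             return prop, col, jt
--     return None
-- ===== SOURCE B (Python) =====
-- from typing import Sequence, Tuple
--
-- def primary_display_field(fields: Sequence[Tuple[str, str, str]], excluded_props: Sequence[str] = ()) -> Tuple[str, str, str] | None:
--     excluded = {p.lower() for p in excluded_props}
--     fallback = None
--     for prop, col, jt in fields or []:
--         low = prop.lower()
--         if low in excluded:
--             continue
--         if fallback is None:
--             fallback = (prop, col, jt)
--         if any(tok in low for tok in ("name", "title", "label", "nm")):
--             return prop, col, jt
--     return fallback
-- ===== Notes on version B (the rewrite author's own statement) =====
-- stated objective: alternative
-- what changed: Replaces A's two sequential scans (name-like pass, then fallback pass) by a single pass that records the first non-excluded field as a fallback while returning the first name-like field immediately.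
import Mathlib
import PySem

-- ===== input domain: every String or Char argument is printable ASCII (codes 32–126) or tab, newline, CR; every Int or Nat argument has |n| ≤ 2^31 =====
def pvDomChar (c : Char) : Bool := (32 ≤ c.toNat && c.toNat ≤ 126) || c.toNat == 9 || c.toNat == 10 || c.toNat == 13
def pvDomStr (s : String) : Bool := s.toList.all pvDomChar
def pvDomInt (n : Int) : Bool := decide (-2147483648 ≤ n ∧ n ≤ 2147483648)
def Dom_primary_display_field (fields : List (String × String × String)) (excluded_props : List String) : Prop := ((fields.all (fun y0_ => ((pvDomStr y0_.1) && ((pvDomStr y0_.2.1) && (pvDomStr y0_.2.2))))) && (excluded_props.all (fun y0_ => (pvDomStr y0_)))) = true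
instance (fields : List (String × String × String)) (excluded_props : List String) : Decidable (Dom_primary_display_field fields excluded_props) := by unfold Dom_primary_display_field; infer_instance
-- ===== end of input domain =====

-- B collapses A's two sequential scans into one pass with a fallback variable (objective: alternative decomposition, same cost).

-- ===== PORT A =====
-- shared helper: `any(tok in low for tok in ("name", "title", "label", "nm"))`
def pvNamelike (low : String) : Bool :=
  PySem.Str.isIn "name" low || PySem.Str.isIn "title" low ||
  PySem.Str.isIn "label" low || PySem.Str.isIn "nm" low

-- first loop of A: first non-excluded field whose lowered prop is name-like
def pvLoop1 (excluded : PySem.Set String) :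
    List (String × String × String) → Option (String × String × String)
  | [] => none
  | f :: rest =>
    let low := PySem.Str.lower f.1
    if PySem.Set.contains excluded low then pvLoop1 excluded rest
    else if pvNamelike low then some f
    else pvLoop1 excluded rest

-- second loop of A: first non-excluded field
def pvLoop2 (excluded : PySem.Set String) :
    List (String × String × String) → Option (String × String × String)
  | [] => none
  | f :: rest =>
    if PySem.Set.contains excluded (PySem.Str.lower f.1) then pvLoop2 excluded rest
    else some f

def primary_display_field (fields : List (String × String × String)) (excluded_props : List String) : Option (String × String × String) :=
  let excluded := PySem.Set.ofList (excluded_props.map PySem.Str.lower)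
  match pvLoop1 excluded fields with
  | some r => some r
  | none => pvLoop2 excluded fields

-- ===== PORT B =====
-- single pass carrying the fallback (first non-excluded field seen so far)
def pvGo (excluded : PySem.Set String) :
    List (String × String × String) → Option (String × String × String) → Option (String × String × String)
  | [], fallback => fallback
  | f :: rest, fallback =>
    let low := PySem.Str.lower f.1
    if PySem.Set.contains excluded low then pvGo excluded rest fallback
    else
      let fallback' := if fallback.isNone then some f else fallback
      if pvNamelike low then some f
      else pvGo excluded rest fallback'

def primary_display_field_alt (fields : List (String × String × String)) (excluded_props : List String) : Option (String × String × String) :=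
  let excluded := PySem.Set.ofList (excluded_props.map PySem.Str.lower)
  pvGo excluded fields none

-- ===== PRECONDITION & SPEC =====
def Spec_primary_display_field (fields : List (String × String × String)) (excluded_props : List String) (out : Option (String × String × String)) : Prop := out = primary_display_field_alt fields excluded_props
instance (fields : List (String × String × String)) (excluded_props : List String) (out : Option (String × String × String)) : Decidable (Spec_primary_display_field fields excluded_props out) := by unfold Spec_primary_display_field; infer_instance

-- ===== CLAIM (what is proved, stated in full; the proofs are below) =====
def Claim_equal_primary_display_field : Prop := ∀ (fields : List (String × String × String)) (excluded_props : List String), Dom_primary_display_field fields excluded_props → Spec_primary_display_field fields excluded_props (primary_display_field fields excluded_props)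

-- ===== LEMMAS AND PROOFS =====
-- loop invariant: the single pass with fallback fb equals "loop1's answer, else fb, else loop2's answer"
theorem pvGo_eq (excluded : PySem.Set String) (fields : List (String × String × String)) :
    ∀ fb : Option (String × String × String),
      pvGo excluded fields fb =
        match pvLoop1 excluded fields with
        | some r => some r
        | none => match fb with
          | some x => some x
          | none => pvLoop2 excluded fields := by
  induction fields with
  | nil => intro fb; cases fb <;> simp [pvGo, pvLoop1, pvLoop2]
  | cons f rest ih =>
    intro fb
    simp only [pvGo, pvLoop1, pvLoop2]
    by_cases hex : PySem.Str.lower f.1 ∈ excluded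
    · simp [hex, ih fb]
    · by_cases hn : pvNamelike (PySem.Str.lower f.1)
      · simp [hex, hn]
      · cases fb <;> simp [hex, hn, ih]

-- ===== VERDICT (by name: the statement is the Claim_ definition above) =====
theorem primary_display_field_spec : Claim_equal_primary_display_field := by
  intro fields excluded_props _
  unfold Spec_primary_display_field primary_display_field primary_display_field_alt
  rw [pvGo_eq]
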